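-- pv_equiv track=rewrite | github.com/Wybu/Py_PTIT | 01039.py | is_beautiful_number
-- ===== SOURCE A (Python) =====
-- def is_beautiful_number(n):
--     # Chuyển số n thành chuỗi để dễ xử lý
--     n_str = str(n)
--
--     # Kiểm tra xem số có hai chữ số khác nhau hay không
--     if len(set(n_str)) != 2:
--         return False
--
--     # Kiểm tra xem các chữ số có cách nhau 2 vị trí đều bằng nhau hay không
--     for i in range(2, len(n_str)):
--         if n_str[i] != n_str[i - 2]:
--             return False
--
--     # Nếu vượt qua cả hai điều kiện trên, số được coi là số đẹp
--     return True
-- ===== SOURCE B (Python) =====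
-- def is_beautiful_number(n):
--     # Build the expected period-2 pattern from the first two characters and
--     # compare the whole string against it.
--     s = str(n)
--     return len(s) > 1 and s[0] != s[1] and s == (s[:2] * ((len(s) + 1) // 2))[:len(s)]
-- ===== Notes on version B (the rewrite author's own statement) =====
-- stated objective: alternative
-- what changed: Instead of a distinct-character count plus an index scan comparing s[i] to s[i-2], B constructs the expected alternating string (the first two characters repeated) and tests the whole string for equality against it.
import Mathlib
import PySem

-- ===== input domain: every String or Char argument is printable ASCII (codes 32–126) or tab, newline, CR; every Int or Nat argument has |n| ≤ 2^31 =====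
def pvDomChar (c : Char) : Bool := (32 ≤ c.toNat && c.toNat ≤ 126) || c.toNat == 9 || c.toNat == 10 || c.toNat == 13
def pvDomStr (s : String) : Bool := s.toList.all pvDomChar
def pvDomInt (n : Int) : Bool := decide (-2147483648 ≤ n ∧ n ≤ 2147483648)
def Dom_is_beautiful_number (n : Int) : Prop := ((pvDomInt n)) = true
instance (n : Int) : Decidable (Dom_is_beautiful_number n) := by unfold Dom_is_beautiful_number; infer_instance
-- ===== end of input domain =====

-- B checks period-2 alternation by building the expected alternating string from the first
-- two characters of str(n) and comparing, instead of A's distinct-count plus s[i] vs s[i-2] scan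
-- (an alternative decomposition of the same O(n) check).


-- ===== PORT A =====
def is_beautiful_number (n : Int) : Bool :=
  let nStr := PySem.Int.toChars n
  if (PySem.Set.ofList nStr).length ≠ 2 then false
  else
    -- for i in range(2, len(n_str)): if n_str[i] != n_str[i-2]: return False  / return True
    (PySem.List.pyRange 2 (nStr.length : Int)).all
      (fun i => PySem.List.pyGet? nStr i == PySem.List.pyGet? nStr (i - 2))

-- ===== PORT B =====
-- list repetition `xs * k` is ported by hand as (List.replicate k xs).flatten (exact for k ≥ 0)
def is_beautiful_number_alt (n : Int) : Bool :=
  let s := PySem.Int.toChars n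
  decide (1 < s.length) &&
    (PySem.List.pyGet? s 0 != PySem.List.pyGet? s 1) &&
    (s == PySem.List.slice
      ((List.replicate (PySem.Int.floordiv ((s.length : Int) + 1) 2).toNat
          (PySem.List.slice s none (some 2))).flatten)
      none (some (s.length : Int)))

-- ===== PRECONDITION & SPEC =====
def Spec_is_beautiful_number (n : Int) (out : Bool) : Prop := out = is_beautiful_number_alt n
instance (n : Int) (out : Bool) : Decidable (Spec_is_beautiful_number n out) := by unfold Spec_is_beautiful_number; infer_instance

-- ===== CLAIM (what is proved, stated in full; the proofs are below) =====
def Claim_equal_is_beautiful_number : Prop := ∀ (n : Int), Dom_is_beautiful_number n → Spec_is_beautiful_number n (is_beautiful_number n)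

-- ===== LEMMAS AND PROOFS =====
-- pvA / pvB: the two port bodies, generalized over the character list str(n),
-- so the equivalence can be proved for an arbitrary list of characters.
def pvA (s : List Char) : Bool :=
  if (PySem.Set.ofList s).length ≠ 2 then false
  else (PySem.List.pyRange 2 (s.length : Int)).all
      (fun i => PySem.List.pyGet? s i == PySem.List.pyGet? s (i - 2))

def pvB (s : List Char) : Bool :=
  decide (1 < s.length) &&
    (PySem.List.pyGet? s 0 != PySem.List.pyGet? s 1) &&
    (s == PySem.List.slice
      ((List.replicate (PySem.Int.floordiv ((s.length : Int) + 1) 2).toNat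
          (PySem.List.slice s none (some 2))).flatten)
      none (some (s.length : Int)))

def pvStep2 (s : List Char) : Prop := ∀ j : Nat, j + 2 < s.length → s.getD (j+2) ' ' = s.getD j ' '
def pvAlt (s : List Char) (a b : Char) : Prop :=
  ∀ i : Nat, i < s.length → s.getD i ' ' = if i % 2 = 0 then a else b

-- 1. A's loop = pvStep2
lemma chk_iff (s : List Char) :
    ((PySem.List.pyRange 2 (s.length : Int)).all
      (fun i => PySem.List.pyGet? s i == PySem.List.pyGet? s (i - 2)) = true) ↔ pvStep2 s := by
  rw [List.all_eq_true]
  constructor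
  · intro h j hj
    have hm : ((j+2 : Nat) : Int) ∈ PySem.List.pyRange 2 (s.length : Int) := by
      rw [PySem.List.mem_pyRange_one]; constructor <;> [push_cast; push_cast] <;> omega
    have := h _ hm
    simp only [show ((j+2 : Nat) : Int) - 2 = ((j : Nat) : Int) by push_cast; ring,
      PySem.List.pyGet?_natCast] at this
    rw [List.getElem?_eq_getElem hj, List.getElem?_eq_getElem (by omega : j < s.length)] at this
    simp at this
    rw [List.getD_eq_getElem _ _ hj, List.getD_eq_getElem _ _ (by omega)]
    exact this
  · intro h i hi
    rw [PySem.List.mem_pyRange_one] at hi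
    obtain ⟨h2, hl⟩ := hi
    obtain ⟨j, rfl⟩ : ∃ j : Nat, i = ((j + 2 : Nat) : Int) := ⟨i.toNat - 2, by omega⟩
    have hjl : j + 2 < s.length := by omega
    simp only [show ((j+2 : Nat) : Int) - 2 = ((j : Nat) : Int) by push_cast; ring,
      PySem.List.pyGet?_natCast]
    rw [List.getElem?_eq_getElem hjl, List.getElem?_eq_getElem (by omega : j < s.length)]
    have := h j hjl
    rw [List.getD_eq_getElem _ _ hjl, List.getD_eq_getElem _ _ (by omega)] at this
    simp [this]

-- 2/3. pvStep2 ↔ pvAlt (first two)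
lemma step2_alt (s : List Char) :
    pvStep2 s ↔ pvAlt s (s.getD 0 ' ') (s.getD 1 ' ') := by
  constructor
  · intro hP i
    induction i using Nat.strong_induction_on with
    | _ i ih =>
      intro hi
      match i with
      | 0 => simp
      | 1 => simp
      | (j+2) =>
        rw [hP j hi, ih j (by omega) (by omega)]
        have : (j + 2) % 2 = j % 2 := by omega
        rw [this]
  · intro hA j hj
    rw [hA _ hj, hA j (by omega)]
    have : (j + 2) % 2 = j % 2 := by omega
    rw [this]

-- 4/5. flatten of replicate [a,b]
lemma flatlen (k : Nat) (a b : Char) : ((List.replicate k [a,b]).flatten).length = 2*k := by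
  simp [List.length_flatten]; ring

lemma flatget (a b : Char) : ∀ (k i : Nat), i < 2*k →
    ((List.replicate k [a,b]).flatten).getD i ' ' = if i % 2 = 0 then a else b := by
  intro k
  induction k with
  | zero => intro i hi; omega
  | succ m ih =>
    intro i hi
    rw [List.replicate_succ, List.flatten_cons]
    match i with
    | 0 => simp
    | 1 => simp
    | (j+2) =>
      have : ([a,b] ++ (List.replicate m [a,b]).flatten).getD (j+2) ' '
          = ((List.replicate m [a,b]).flatten).getD j ' ' := rfl
      rw [this, ih j (by omega)]
      have : (j + 2) % 2 = j % 2 := by omega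
      rw [this]

-- 6. pattern equality ↔ pvAlt
lemma pattern_iff (s : List Char) (a b : Char) (k : Nat) (hk : s.length ≤ 2*k) :
    (s = List.take s.length ((List.replicate k [a,b]).flatten)) ↔ pvAlt s a b := by
  constructor
  · intro hEq i hi
    have hfl : i < ((List.replicate k [a,b]).flatten).length := by rw [flatlen]; omega
    have h1 : ((List.replicate k [a,b]).flatten).getD i ' ' = if i % 2 = 0 then a else b :=
      flatget a b k i (by omega)
    rw [List.getD_eq_getElem _ ' ' hfl] at h1
    conv_lhs => rw [hEq]
    rw [List.getD_eq_getElem _ _ (by rw [List.length_take, flatlen]; omega), List.getElem_take]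
    exact h1
  · intro hA
    apply List.ext_getElem?
    intro i
    rw [List.getElem?_take]
    by_cases hi : i < s.length
    · rw [if_pos hi, List.getElem?_eq_getElem hi,
        List.getElem?_eq_getElem (show i < ((List.replicate k [a,b]).flatten).length by rw [flatlen]; omega)]
      have h1 := flatget a b k i (by omega)
      rw [List.getD_eq_getElem _ ' ' (by rw [flatlen]; omega)] at h1
      have h2 := hA i hi
      rw [List.getD_eq_getElem s ' ' hi] at h2
      rw [h1, h2]
    · rw [if_neg hi, List.getElem?_eq_none (by omega)]

-- membership under pvAlt
lemma mem_of_alt (s : List Char) (a b : Char) (hA : pvAlt s a b) (x : Char) (hx : x ∈ s) :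
    x = a ∨ x = b := by
  obtain ⟨i, hi, rfl⟩ := List.mem_iff_getElem.mp hx
  rw [← List.getD_eq_getElem s ' ' hi, hA i hi]
  split <;> simp

lemma take2_eq (s : List Char) (h2 : 2 ≤ s.length) :
    List.take 2 s = [s.getD 0 ' ', s.getD 1 ' '] := by
  match s, h2 with
  | c :: d :: t, _ => rfl

-- 7. set size = 2
lemma setsize_two (s : List Char) (a b : Char) (h2 : 2 ≤ s.length)
    (ha : s.getD 0 ' ' = a) (hb : s.getD 1 ' ' = b) (hab : a ≠ b) (hA : pvAlt s a b) :
    (PySem.Set.ofList s).length = 2 := by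
  have hnd := PySem.Set.nodup_ofList s
  have hfin : (PySem.Set.ofList s).toFinset = {a, b} := by
    ext x
    simp only [List.mem_toFinset, PySem.Set.mem_ofList, Finset.mem_insert, Finset.mem_singleton]
    constructor
    · exact mem_of_alt s a b hA x
    · rintro (rfl | rfl)
      · rw [← ha, List.getD_eq_getElem s ' ' (by omega)]; exact List.getElem_mem _
      · rw [← hb, List.getD_eq_getElem s ' ' (by omega)]; exact List.getElem_mem _
  rw [← List.toFinset_card_of_nodup hnd, hfin, Finset.card_pair hab]

-- 8. set size = 2 → 2 ≤ length
lemma setsize_le (s : List Char) (h : (PySem.Set.ofList s).length = 2) : 2 ≤ s.length := by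
  have hnd := PySem.Set.nodup_ofList s
  have hsub : (PySem.Set.ofList s).toFinset ⊆ s.toFinset := by
    intro x hx
    simp only [List.mem_toFinset, PySem.Set.mem_ofList] at hx ⊢; exact hx
  have := Finset.card_le_card hsub
  rw [List.toFinset_card_of_nodup hnd, h] at this
  exact le_trans this (List.toFinset_card_le s)

-- 9. all equal → set size ≤ 1
lemma setsize_one (s : List Char) (a : Char) (hA : pvAlt s a a) :
    (PySem.Set.ofList s).length ≤ 1 := by
  have hnd := PySem.Set.nodup_ofList s
  have hsub : (PySem.Set.ofList s).toFinset ⊆ {a} := by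
    intro x hx
    simp only [List.mem_toFinset, PySem.Set.mem_ofList] at hx
    rcases mem_of_alt s a a hA x hx with rfl | rfl <;> simp
  have := Finset.card_le_card hsub
  rw [List.toFinset_card_of_nodup hnd, Finset.card_singleton] at this
  exact this

theorem pvAB (s : List Char) : pvA s = pvB s := by
  have h0 : PySem.List.pyGet? s 0 = s[0]? := by exact_mod_cast PySem.List.pyGet?_natCast s 0
  have h1 : PySem.List.pyGet? s 1 = s[1]? := by exact_mod_cast PySem.List.pyGet?_natCast s 1
  have hsl2 : PySem.List.slice s none (some 2) = List.take 2 s := by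
    rw [PySem.List.slice_to s (by norm_num)]; rfl
  have hkk : (PySem.Int.floordiv ((s.length : Int) + 1) 2).toNat = (s.length + 1) / 2 := by
    rw [show ((s.length : Int) + 1) = (((s.length + 1) : Nat) : Int) by push_cast; ring,
        show (2 : Int) = ((2 : Nat) : Int) by norm_num, PySem.Int.floordiv_natCast,
        Int.toNat_natCast]
  have hslL : ∀ (l : List Char),
      PySem.List.slice l none (some (s.length : Int)) = List.take s.length l := by
    intro l
    rw [PySem.List.slice_to l (by positivity), Int.toNat_natCast]
  unfold pvA pvB
  rw [hsl2, hkk, hslL, h0, h1]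
  by_cases hset : (PySem.Set.ofList s).length = 2
  · rw [if_neg (by simpa using hset)]
    have hL2 := setsize_le s hset
    have ha0 : s[0]? = some (s.getD 0 ' ') := by
      rw [List.getElem?_eq_getElem (by omega), List.getD_eq_getElem s ' ' (by omega)]
    have hb1 : s[1]? = some (s.getD 1 ' ') := by
      rw [List.getElem?_eq_getElem (by omega), List.getD_eq_getElem s ' ' (by omega)]
    rw [ha0, hb1, take2_eq s hL2, decide_eq_true (show 1 < s.length by omega), Bool.true_and]
    by_cases hab : s.getD 0 ' ' = s.getD 1 ' '
    · rw [hab]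
      have hne : ((some (s.getD 1 ' ') != some (s.getD 1 ' '))) = false := by simp
      rw [hne, Bool.false_and]
      cases hchk : (PySem.List.pyRange 2 (s.length : Int)).all
          (fun i => PySem.List.pyGet? s i == PySem.List.pyGet? s (i - 2)) with
      | false => rfl
      | true =>
        exfalso
        have hP := (chk_iff s).mp hchk
        have hA := (step2_alt s).mp hP
        rw [hab] at hA
        have := setsize_one s (s.getD 1 ' ') hA
        omega
    · have hne : ((some (s.getD 0 ' ') != some (s.getD 1 ' '))) = true := by
        rw [bne_iff_ne]; simp only [ne_eq, Option.some.injEq]; exact hab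
      rw [hne, Bool.true_and]
      rw [Bool.eq_iff_iff, chk_iff, beq_iff_eq, step2_alt s,
        pattern_iff s _ _ ((s.length + 1) / 2) (by omega)]
  · rw [if_pos (by simpa using hset)]
    cases hB : (decide (1 < s.length) && (s[0]? != s[1]?) &&
        (s == List.take s.length
          ((List.replicate ((s.length + 1) / 2) (List.take 2 s)).flatten))) with
    | false => rfl
    | true =>
      exfalso
      simp only [Bool.and_eq_true, decide_eq_true_eq, bne_iff_ne, beq_iff_eq] at hB
      obtain ⟨⟨hlen, hne⟩, hpat⟩ := hB
      have ha0 : s[0]? = some (s.getD 0 ' ') := by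
        rw [List.getElem?_eq_getElem (by omega), List.getD_eq_getElem s ' ' (by omega)]
      have hb1 : s[1]? = some (s.getD 1 ' ') := by
        rw [List.getElem?_eq_getElem (by omega), List.getD_eq_getElem s ' ' (by omega)]
      rw [ha0, hb1] at hne
      have hab : s.getD 0 ' ' ≠ s.getD 1 ' ' := by
        intro h; exact hne (by rw [h])
      rw [take2_eq s (by omega)] at hpat
      have hA := (pattern_iff s _ _ ((s.length + 1) / 2) (by omega)).mp hpat
      have := setsize_two s _ _ (by omega) rfl rfl hab hA
      omega

-- ===== VERDICT (by name: the statement is the Claim_ definition above) =====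
theorem is_beautiful_number_spec : Claim_equal_is_beautiful_number := by
  intro n _
  unfold Spec_is_beautiful_number is_beautiful_number is_beautiful_number_alt
  exact pvAB (PySem.Int.toChars n)
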